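-- pv_equiv track=rewrite | github.com/YukinoHayakawa/Mediawiker | mediawiker.py | delim_fixer
-- ===== SOURCE A (Python) =====
-- def delim_fixer(string_data):
--     string_data = string_data[1:]
--     tags_start = ['[', '{']
--     tags_end = [']', '}']
--     CELL_CHAR = '|'
--     REPLACE_STR = '""""'
--     is_tag = False
--     string_out = ''
--     for char in string_data:
--         if char in tags_start and not is_tag:
--             is_tag = True
--         if is_tag and char in tags_end:
--             is_tag = False
--         if is_tag and char == CELL_CHAR:
--             string_out += REPLACE_STR
--         else:
--             string_out += char
--     return string_out
-- ===== SOURCE B (Python) =====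
-- def delim_fixer(string_data):
--     s = string_data[1:]
--     n = len(s)
--     parts = []
--     i = 0
--     while True:
--         j = i
--         while j < n and s[j] not in '[{':
--             j += 1
--         parts.append(s[i:j])
--         if j == n:
--             break
--         k = j + 1
--         while k < n and s[k] not in ']}':
--             k += 1
--         end = min(k + 1, n)
--         parts.append(s[j:end].replace('|', '""""'))
--         i = end
--     return ''.join(parts)
-- ===== Notes on version B (the rewrite author's own statement) =====
-- stated objective: alternative
-- what changed: Replaces the per-character boolean state machine with region segmentation: scan to the next opening bracket, scan to its first closing bracket, and bulk-replace the cell character only inside that slice, emitting everything else verbatim.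
import Mathlib
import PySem

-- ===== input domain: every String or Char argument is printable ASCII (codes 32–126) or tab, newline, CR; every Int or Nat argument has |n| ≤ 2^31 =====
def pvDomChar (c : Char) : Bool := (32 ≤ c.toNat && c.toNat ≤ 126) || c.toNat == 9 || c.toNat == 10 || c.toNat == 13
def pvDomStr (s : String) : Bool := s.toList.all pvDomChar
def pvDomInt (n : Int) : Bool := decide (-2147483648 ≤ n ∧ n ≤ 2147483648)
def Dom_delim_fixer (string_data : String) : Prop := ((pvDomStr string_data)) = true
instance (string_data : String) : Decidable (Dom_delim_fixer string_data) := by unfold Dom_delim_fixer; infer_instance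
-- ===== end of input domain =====

-- B replaces A's per-character boolean state machine by region segmentation (scan to the next
-- opening bracket, then to its first closing bracket, bulk-replace the cell character only in that region);
-- objective: alternative decomposition of the same task, same cost.

-- ===== PORT A =====
-- A's loop body: state = (is_tag, string_out), one step per character, branches in A's order
def pvAStep (st : Bool × List Char) (c : Char) : Bool × List Char :=
  let is_tag := st.1
  let is_tag := if (c = '[' ∨ c = '{') ∧ ¬ is_tag then true else is_tag
  let is_tag := if is_tag ∧ (c = ']' ∨ c = '}') then false else is_tag
  if is_tag ∧ c = '|' then (is_tag, st.2 ++ ['"', '"', '"', '"'])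
  else (is_tag, st.2 ++ [c])

def delim_fixer (string_data : String) : String :=
  -- string_data = string_data[1:]
  let s := PySem.List.slice string_data.toList (some 1) none
  String.ofList (s.foldl pvAStep (false, [])).2

-- ===== PORT B =====
def pvNotStart (c : Char) : Bool := !(c == '[' || c == '{')   -- s[j] not in '[{'
def pvNotEnd (c : Char) : Bool := !(c == ']' || c == '}')     -- s[k] not in ']}'

-- region.replace('|', '""""'), character by character (exact: the pattern is a single char)
def pvBReplace : List Char → List Char
  | [] => []
  | c :: t => (if c = '|' then ['"', '"', '"', '"'] else [c]) ++ pvBReplace t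

-- B's outer while-loop: span = the inner scan loops; emit the bracket-free prefix, then one
-- bulk-replaced region s[j:end] (closing char included when present), and continue after it
def pvBGo (cs : List Char) : List Char :=
  match h : cs.span pvNotStart with
  | (pre, []) => pre
  | (pre, b :: t) =>
    match h2 : t.span pvNotEnd with
    | (body, []) => pre ++ pvBReplace (b :: body)
    | (body, e :: t2) => pre ++ pvBReplace (b :: (body ++ [e])) ++ pvBGo t2
termination_by cs.length
decreasing_by
  have hd : cs.dropWhile pvNotStart = b :: t := by
    rw [List.span_eq_takeWhile_dropWhile] at h
    exact congrArg Prod.snd h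
  have hd2 : t.dropWhile pvNotEnd = e :: t2 := by
    rw [List.span_eq_takeWhile_dropWhile] at h2
    exact congrArg Prod.snd h2
  have h1 : (b :: t).length ≤ cs.length := hd ▸ cs.length_dropWhile_le pvNotStart
  have h2' : (e :: t2).length ≤ t.length := hd2 ▸ t.length_dropWhile_le pvNotEnd
  simp at h1 h2'; omega

def delim_fixer_alt (string_data : String) : String :=
  let s := PySem.List.slice string_data.toList (some 1) none
  String.ofList (pvBGo s)

-- ===== PRECONDITION & SPEC =====
def Spec_delim_fixer (string_data : String) (out : String) : Prop := out = delim_fixer_alt string_data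
instance (string_data : String) (out : String) : Decidable (Spec_delim_fixer string_data out) := by unfold Spec_delim_fixer; infer_instance

-- ===== CLAIM (what is proved, stated in full; the proofs are below) =====
def Claim_equal_delim_fixer : Prop := ∀ (string_data : String), Dom_delim_fixer string_data → Spec_delim_fixer string_data (delim_fixer string_data)

-- ===== LEMMAS AND PROOFS =====

-- branch equations for pvBGo, one per shape of the two spans
theorem pvBGo_nil (cs pre : List Char) (h : cs.span pvNotStart = (pre, [])) :
    pvBGo cs = pre := by
  rw [pvBGo]; split
  · rename_i pre' h'
    rw [h] at h'; injection h' with a b; rw [a]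
  · rename_i pre' b' t' h'
    rw [h] at h'; injection h' with a bb; exact absurd bb.symm (by simp)

theorem pvBGo_noend (cs pre : List Char) (b : Char) (t body : List Char)
    (h : cs.span pvNotStart = (pre, b :: t)) (h2 : t.span pvNotEnd = (body, [])) :
    pvBGo cs = pre ++ pvBReplace (b :: body) := by
  rw [pvBGo]; split
  · rename_i pre' h'
    rw [h] at h'; injection h' with a bb; exact absurd bb (by simp)
  · rename_i pre' b' t' h'
    rw [h] at h'; injection h' with a bb; injection bb with c d
    subst a; subst c; subst d
    split
    · rename_i body' h2'
      rw [h2] at h2'; injection h2' with a b; rw [a]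
    · rename_i body' e' t2' h2'
      rw [h2] at h2'; injection h2' with a bb; exact absurd bb.symm (by simp)

theorem pvBGo_end (cs pre : List Char) (b : Char) (t body : List Char) (e : Char) (t2 : List Char)
    (h : cs.span pvNotStart = (pre, b :: t)) (h2 : t.span pvNotEnd = (body, e :: t2)) :
    pvBGo cs = pre ++ pvBReplace (b :: (body ++ [e])) ++ pvBGo t2 := by
  rw [pvBGo]; split
  · rename_i pre' h'
    rw [h] at h'; injection h' with a bb; exact absurd bb (by simp)
  · rename_i pre' b' t' h'
    rw [h] at h'; injection h' with a bb; injection bb with c d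
    subst a; subst c; subst d
    split
    · rename_i body' h2'
      rw [h2] at h2'; injection h2' with a bb; exact absurd bb (by simp)
    · rename_i body' e' t2' h2'
      rw [h2] at h2'; injection h2' with a bb; injection bb with c d
      subst a; subst c; subst d; rfl

theorem pvBReplace_append (xs ys : List Char) :
    pvBReplace (xs ++ ys) = pvBReplace xs ++ pvBReplace ys := by
  induction xs with
  | nil => simp [pvBReplace]
  | cons c t ih => simp [pvBReplace, ih]

-- the four possible single steps of A's state machine, by the class of the character
theorem pvStep_notStart (acc : List Char) (c : Char) (h : pvNotStart c = true) :
    pvAStep (false, acc) c = (false, acc ++ [c]) := by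
  have hc : ¬(c = '[' ∨ c = '{') := by
    simp [pvNotStart] at h; exact fun hor => hor.elim (fun e => h.1 e) (fun e => h.2 e)
  simp [pvAStep, hc]

theorem pvStep_start (acc : List Char) (c : Char) (h : pvNotStart c = false) :
    pvAStep (false, acc) c = (true, acc ++ [c]) := by
  have hc : c = '[' ∨ c = '{' := by
    by_cases h1 : c = '['
    · exact Or.inl h1
    · refine Or.inr ?_
      simp [pvNotStart, h1] at h
      exact h
  rcases hc with h | h <;> subst h <;> simp [pvAStep]

theorem pvStep_notEnd (acc : List Char) (c : Char) (h : pvNotEnd c = true) :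
    pvAStep (true, acc) c = (true, acc ++ (if c = '|' then ['"', '"', '"', '"'] else [c])) := by
  have hc : ¬(c = ']' ∨ c = '}') := by
    simp [pvNotEnd] at h; exact fun hor => hor.elim (fun e => h.1 e) (fun e => h.2 e)
  by_cases hp : c = '|' <;> simp [pvAStep, hc, hp]

theorem pvStep_end (acc : List Char) (c : Char) (h : pvNotEnd c = false) :
    pvAStep (true, acc) c = (false, acc ++ [c]) := by
  have hc : c = ']' ∨ c = '}' := by
    by_cases h1 : c = ']'
    · exact Or.inl h1
    · refine Or.inr ?_
      simp [pvNotEnd, h1] at h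
      exact h
  rcases hc with h | h <;> subst h <;> simp [pvAStep]

-- A's fold stays in state `false` over a bracket-free block, appending it verbatim
theorem pvFoldl_false (pre : List Char) (h : ∀ c ∈ pre, pvNotStart c = true) :
    ∀ acc : List Char, pre.foldl pvAStep (false, acc) = (false, acc ++ pre) := by
  induction pre with
  | nil => intro acc; simp
  | cons c t ih =>
    intro acc
    rw [List.foldl_cons, pvStep_notStart acc c (h c (by simp)),
      ih (fun x hx => h x (by simp [hx]))]
    simp

-- A's fold stays in state `true` over an end-free block, appending its char-wise replacement
theorem pvFoldl_true (body : List Char) (h : ∀ c ∈ body, pvNotEnd c = true) :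
    ∀ acc : List Char, body.foldl pvAStep (true, acc) = (true, acc ++ pvBReplace body) := by
  induction body with
  | nil => intro acc; simp [pvBReplace]
  | cons c t ih =>
    intro acc
    rw [List.foldl_cons, pvStep_notEnd acc c (h c (by simp)),
      ih (fun x hx => h x (by simp [hx]))]
    simp [pvBReplace]

theorem pvReplace_nonpipe (b : Char) (h : b ≠ '|') :
    pvBReplace [b] = [b] := by simp [pvBReplace, h]

-- opening / closing bracket chars are never '|'
theorem pvStart_ne_pipe (b : Char) (h : pvNotStart b = false) : b ≠ '|' := by
  by_cases h1 : b = '[' <;> simp [pvNotStart, h1] at h ⊢ <;> simp [h]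
theorem pvEnd_ne_pipe (e : Char) (h : pvNotEnd e = false) : e ≠ '|' := by
  by_cases h1 : e = ']' <;> simp [pvNotEnd, h1] at h ⊢ <;> simp [h]

-- head of a nonempty dropWhile fails the predicate
theorem pvHead_dropWhile {α : Type} {p : α → Bool} {l : List α} {b : α} {t : List α}
    (h : l.dropWhile p = b :: t) : p b = false := by
  induction l with
  | nil => simp at h
  | cons c cs ih =>
    rw [List.dropWhile_cons] at h
    by_cases hc : p c
    · simp [hc] at h; exact ih h
    · simp [hc] at h; rw [← h.1]; simpa using hc

-- main invariant: A's whole fold from state `false` produces exactly B's region walk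
theorem pvMain (cs : List Char) :
    ∀ acc : List Char, (cs.foldl pvAStep (false, acc)).2 = acc ++ pvBGo cs := by
  induction cs using pvBGo.induct with
  | case1 cs pre h =>
    intro acc
    have hsw := h; rw [List.span_eq_takeWhile_dropWhile] at hsw
    have hpre : cs.takeWhile pvNotStart = pre := congrArg Prod.fst hsw
    have hrest : cs.dropWhile pvNotStart = [] := congrArg Prod.snd hsw
    have hsplit : cs = pre := by
      rw [← List.takeWhile_append_dropWhile (p := pvNotStart) (l := cs), hpre, hrest]; simp
    have hall : ∀ c ∈ pre, pvNotStart c = true := fun c hc =>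
      List.mem_takeWhile_imp (by rw [hpre]; exact hc)
    rw [pvBGo_nil cs pre h]
    conv_lhs => rw [hsplit]
    rw [pvFoldl_false pre hall acc]
  | case2 cs pre b t h body h2 =>
    intro acc
    have hsw := h; rw [List.span_eq_takeWhile_dropWhile] at hsw
    have hsw2 := h2; rw [List.span_eq_takeWhile_dropWhile] at hsw2
    have hpre : cs.takeWhile pvNotStart = pre := congrArg Prod.fst hsw
    have hrest : cs.dropWhile pvNotStart = b :: t := congrArg Prod.snd hsw
    have hbody : t.takeWhile pvNotEnd = body := congrArg Prod.fst hsw2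
    have hrest2 : t.dropWhile pvNotEnd = [] := congrArg Prod.snd hsw2
    have hsplit : cs = pre ++ b :: t := by
      rw [← List.takeWhile_append_dropWhile (p := pvNotStart) (l := cs), hpre, hrest]
    have hsplit2 : t = body := by
      rw [← List.takeWhile_append_dropWhile (p := pvNotEnd) (l := t), hbody, hrest2]; simp
    have hb : pvNotStart b = false := pvHead_dropWhile hrest
    have hall : ∀ c ∈ pre, pvNotStart c = true := fun c hc =>
      List.mem_takeWhile_imp (by rw [hpre]; exact hc)
    have hallb : ∀ c ∈ body, pvNotEnd c = true := fun c hc =>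
      List.mem_takeWhile_imp (by rw [hbody]; exact hc)
    conv_lhs => rw [hsplit]
    rw [List.foldl_append, pvFoldl_false pre hall acc, List.foldl_cons,
      pvStep_start _ b hb, hsplit2, pvFoldl_true body hallb]
    rw [pvBGo_noend cs pre b t body h h2]
    show acc ++ pre ++ [b] ++ pvBReplace body = _
    have : pvBReplace (b :: body) = b :: pvBReplace body := by
      rw [show (b :: body) = [b] ++ body by simp, pvBReplace_append,
        pvReplace_nonpipe b (pvStart_ne_pipe b hb)]
      simp
    rw [this]
    simp
  | case3 cs pre b t h body e t2 h2 ih =>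
    intro acc
    have hsw := h; rw [List.span_eq_takeWhile_dropWhile] at hsw
    have hsw2 := h2; rw [List.span_eq_takeWhile_dropWhile] at hsw2
    have hpre : cs.takeWhile pvNotStart = pre := congrArg Prod.fst hsw
    have hrest : cs.dropWhile pvNotStart = b :: t := congrArg Prod.snd hsw
    have hbody : t.takeWhile pvNotEnd = body := congrArg Prod.fst hsw2
    have hrest2 : t.dropWhile pvNotEnd = e :: t2 := congrArg Prod.snd hsw2
    have hsplit : cs = pre ++ b :: t := by
      rw [← List.takeWhile_append_dropWhile (p := pvNotStart) (l := cs), hpre, hrest]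
    have hsplit2 : t = body ++ e :: t2 := by
      rw [← List.takeWhile_append_dropWhile (p := pvNotEnd) (l := t), hbody, hrest2]
    have hb : pvNotStart b = false := pvHead_dropWhile hrest
    have he : pvNotEnd e = false := pvHead_dropWhile hrest2
    have hall : ∀ c ∈ pre, pvNotStart c = true := fun c hc =>
      List.mem_takeWhile_imp (by rw [hpre]; exact hc)
    have hallb : ∀ c ∈ body, pvNotEnd c = true := fun c hc =>
      List.mem_takeWhile_imp (by rw [hbody]; exact hc)
    conv_lhs => rw [hsplit, hsplit2]
    rw [List.foldl_append, pvFoldl_false pre hall acc, List.foldl_cons,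
      pvStep_start _ b hb, List.foldl_append, pvFoldl_true body hallb,
      List.foldl_cons, pvStep_end _ e he, ih]
    rw [pvBGo_end cs pre b t body e t2 h h2]
    have hrepl : pvBReplace (b :: (body ++ [e])) = b :: (pvBReplace body ++ [e]) := by
      rw [show (b :: (body ++ [e])) = [b] ++ body ++ [e] by simp,
        pvBReplace_append, pvBReplace_append,
        pvReplace_nonpipe b (pvStart_ne_pipe b hb), pvReplace_nonpipe e (pvEnd_ne_pipe e he)]
      simp
    rw [hrepl]
    simp

-- ===== VERDICT (by name: the statement is the Claim_ definition above) =====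
theorem delim_fixer_spec : Claim_equal_delim_fixer := by
  intro s _
  unfold Spec_delim_fixer delim_fixer delim_fixer_alt
  simp only [pvMain (PySem.List.slice s.toList (some 1) none) [], List.nil_append]
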